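-- pv_equiv track=rewrite | github.com/ky572/cs6903_proj1 | decrypter.py | get_grouped_n_grams_ordered_by_dec_freq
-- ===== SOURCE A (Python) =====
-- from collections import defaultdict
--
-- def get_grouped_n_grams_ordered_by_dec_freq(dist):
--     n_gram_list = defaultdict(lambda: [])
--     for key in dist:
--         shared_n_gram = key[:-1]
--         n_gram_list[ shared_n_gram ].append(key)
--     for group in n_gram_list:
--         n_gram_list[ group ].sort(key=lambda n_gram: -dist[n_gram])
--     return n_gram_list
-- ===== SOURCE B (Python) =====
-- def get_grouped_n_grams_ordered_by_dec_freq(dist):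
--     grouped = {}
--     for key in dist:
--         prefix = key[:-1]
--         if prefix not in grouped:
--             grouped[prefix] = []
--     for key in sorted(dist, key=lambda k: -dist[k]):
--         grouped[key[:-1]].append(key)
--     return grouped
-- ===== Notes on version B (the rewrite author's own statement) =====
-- stated objective: alternative
-- what changed: A builds prefix buckets then sorts each bucket separately; B sorts all keys once globally by descending frequency and distributes them into the (pre-created, dist-order) buckets in a single pass, relying on sort stability for identical tie order.
import Mathlib
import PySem

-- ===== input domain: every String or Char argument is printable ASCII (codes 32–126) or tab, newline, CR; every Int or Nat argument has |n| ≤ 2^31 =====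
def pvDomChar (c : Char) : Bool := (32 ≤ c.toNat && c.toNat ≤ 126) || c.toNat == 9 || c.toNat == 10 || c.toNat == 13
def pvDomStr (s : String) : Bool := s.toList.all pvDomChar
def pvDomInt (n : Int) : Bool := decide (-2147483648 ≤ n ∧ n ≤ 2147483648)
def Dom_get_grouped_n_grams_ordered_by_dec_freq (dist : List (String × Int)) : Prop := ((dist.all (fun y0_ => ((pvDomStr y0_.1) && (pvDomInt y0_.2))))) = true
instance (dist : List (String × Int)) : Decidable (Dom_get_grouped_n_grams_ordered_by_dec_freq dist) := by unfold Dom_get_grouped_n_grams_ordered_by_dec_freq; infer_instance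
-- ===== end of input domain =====

-- B replaces A's group-then-sort-each-group by one global stable sort followed by one grouping pass (alternative decomposition, same result).

-- ===== PORT A =====
-- key[:-1] (Python string slice, exact)
def pvPrefA (s : String) : String := PySem.Str.slice s none (some (-1))

def get_grouped_n_grams_ordered_by_dec_freq (dist : List (String × Int)) : List (String × List String) :=
  let d := PySem.Dict.ofList dist
  -- n_gram_list = defaultdict(lambda: []); for key in dist: n_gram_list[key[:-1]].append(key)
  let ngl := d.keys.foldl (fun g key => g.modify (pvPrefA key) [] (fun v => v ++ [key])) PySem.Dict.empty
  -- for group in n_gram_list: n_gram_list[group].sort(key=lambda n_gram: -dist[n_gram])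
  let ngl2 := ngl.keys.foldl (fun g grp => g.modify grp [] (fun v => PySem.List.sorted v (fun n => -(d.getD n 0)) false)) ngl
  ngl2.items

-- ===== PORT B =====
-- key[:-1] (Python string slice, exact)
def pvPrefB (s : String) : String := PySem.Str.slice s none (some (-1))

def get_grouped_n_grams_ordered_by_dec_freq_alt (dist : List (String × Int)) : List (String × List String) :=
  let d := PySem.Dict.ofList dist
  -- for key in dist: grouped.setdefault-style bucket creation (dist iteration order)
  let grouped := d.keys.foldl (fun g key => if g.contains (pvPrefB key) then g else g.insert (pvPrefB key) []) PySem.Dict.empty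
  -- order = sorted(dist, key=lambda k: -dist[k])  (stable global sort)
  let order := PySem.List.sorted d.keys (fun k => -(d.getD k 0)) false
  -- for key in order: grouped[key[:-1]].append(key)
  let grouped2 := order.foldl (fun g key => g.modify (pvPrefB key) [] (fun v => v ++ [key])) grouped
  grouped2.items

-- ===== PRECONDITION & SPEC =====
def Spec_get_grouped_n_grams_ordered_by_dec_freq (dist : List (String × Int)) (out : List (String × List String)) : Prop := out = get_grouped_n_grams_ordered_by_dec_freq_alt dist
instance (dist : List (String × Int)) (out : List (String × List String)) : Decidable (Spec_get_grouped_n_grams_ordered_by_dec_freq dist out) := by unfold Spec_get_grouped_n_grams_ordered_by_dec_freq; infer_instance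

-- ===== CLAIM (what is proved, stated in full; the proofs are below) =====
def Claim_equal_get_grouped_n_grams_ordered_by_dec_freq : Prop := ∀ (dist : List (String × Int)), Dom_get_grouped_n_grams_ordered_by_dec_freq dist → Spec_get_grouped_n_grams_ordered_by_dec_freq dist (get_grouped_n_grams_ordered_by_dec_freq dist)

-- ===== LEMMAS AND PROOFS =====

theorem pvPrefB_eq_pvPrefA : pvPrefB = pvPrefA := rfl

-- insertBy puts x in front when x goes before everything
theorem pv_insertBy_all_before {α : Type} (before : α → α → Bool) (x : α) (zs : List α)
    (h : ∀ z ∈ zs, before x z = true) :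
    PySem.List.insertBy before x zs = x :: zs := by
  cases zs with
  | nil => rfl
  | cons z t => simp [PySem.List.insertBy, h z (by simp)]

-- filtering commutes with a single stable insertion into a key-sorted list
theorem pv_filter_insertBy {α : Type} (key : α → Int) (q : α → Bool) (x : α) (ys : List α)
    (h : ys.Pairwise (fun a b => key a ≤ key b)) :
    (PySem.List.insertBy (fun a b => decide (key a < key b)) x ys).filter q =
      if q x then PySem.List.insertBy (fun a b => decide (key a < key b)) x (ys.filter q)
      else ys.filter q := by
  induction ys with
  | nil => simp [PySem.List.insertBy]; split <;> simp_all
  | cons y t ih =>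
    rcases List.pairwise_cons.mp h with ⟨hy, ht⟩
    by_cases hlt : key x < key y
    · have hall : ∀ z ∈ t.filter q, (fun a b => decide (key a < key b)) x z = true := by
        intro z hz
        have hzt := List.mem_of_mem_filter hz
        simp only [decide_eq_true_iff]
        exact lt_of_lt_of_le hlt (hy z hzt)
      simp only [PySem.List.insertBy, hlt, decide_true, if_true]
      by_cases hqx : q x = true
      · by_cases hqy : q y = true
        · simp [hqx, hqy, PySem.List.insertBy, hlt]
        · simp only [List.filter_cons, hqx, hqy, if_true]
          simp only [Bool.false_eq_true, if_false]
          rw [pv_insertBy_all_before _ _ _ hall]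
      · by_cases hqy : q y = true <;>
          simp [hqx, hqy]
    · simp only [PySem.List.insertBy, hlt, decide_false, Bool.false_eq_true, if_false]
      by_cases hqy : q y = true
      · simp only [List.filter_cons, hqy, if_true]
        rw [ih ht]
        by_cases hqx : q x = true
        · simp [hqx, PySem.List.insertBy, hlt]
        · simp [hqx]
      · simp only [List.filter_cons, hqy, Bool.false_eq_true, if_false]
        rw [ih ht]

-- stable insertion keeps the list key-sorted
theorem pv_pairwise_insertBy {α : Type} (key : α → Int) (x : α) (ys : List α)
    (h : ys.Pairwise (fun a b => key a ≤ key b)) :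
    (PySem.List.insertBy (fun a b => decide (key a < key b)) x ys).Pairwise
      (fun a b => key a ≤ key b) := by
  induction ys with
  | nil => simp [PySem.List.insertBy]
  | cons y t ih =>
    rcases List.pairwise_cons.mp h with ⟨hy, ht⟩
    by_cases hlt : key x < key y
    · simp only [PySem.List.insertBy, hlt, decide_true, if_true]
      refine List.pairwise_cons.mpr ⟨?_, h⟩
      intro z hz
      rcases List.mem_cons.mp hz with hz' | hz'
      · subst hz'; exact le_of_lt hlt
      · exact le_of_lt (lt_of_lt_of_le hlt (hy z hz'))
    · simp only [PySem.List.insertBy, hlt, decide_false, Bool.false_eq_true, if_false]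
      refine List.pairwise_cons.mpr ⟨?_, ih ht⟩
      intro z hz
      rcases (PySem.List.mem_insertBy _ _ _ _).mp hz with hz' | hz'
      · subst hz'; exact le_of_not_gt hlt
      · exact hy z hz'

theorem pv_filter_foldl_insertBy {α : Type} (key : α → Int) (q : α → Bool) (xs : List α) :
    ∀ (acc : List α), acc.Pairwise (fun a b => key a ≤ key b) →
    (xs.foldl (fun acc x => PySem.List.insertBy (fun a b => decide (key a < key b)) x acc) acc).filter q =
      (xs.filter q).foldl (fun acc x => PySem.List.insertBy (fun a b => decide (key a < key b)) x acc) (acc.filter q) := by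
  induction xs with
  | nil => intro acc _; rfl
  | cons x t ih =>
    intro acc hacc
    simp only [List.foldl_cons, List.filter_cons]
    rw [ih _ (pv_pairwise_insertBy key x acc hacc), pv_filter_insertBy key q x acc hacc]
    by_cases hqx : q x = true <;> simp [hqx]

-- filtering commutes with the stable sort
theorem pv_filter_sorted {α : Type} (key : α → Int) (q : α → Bool) (xs : List α) :
    (PySem.List.sorted xs key false).filter q = PySem.List.sorted (xs.filter q) key false := by
  rw [PySem.List.sorted_eq_foldl_insertBy, PySem.List.sorted_eq_foldl_insertBy]
  simpa using pv_filter_foldl_insertBy key q xs [] (by simp)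

-- getD through a fold of modifies over distinct keys
theorem pv_getD_foldl_modify_of_not_mem {κ ν : Type} [BEq κ] [LawfulBEq κ] [DecidableEq κ]
    (l : List κ) (d0 : ν) (f : κ → ν → ν) (c : κ) (hc : c ∉ l) :
    ∀ (g : PySem.Dict κ ν),
    (l.foldl (fun g k => g.modify k d0 (f k)) g).getD c d0 = g.getD c d0 := by
  induction l with
  | nil => intro g; rfl
  | cons k t ih =>
    intro g
    simp only [List.foldl_cons]
    rw [ih (fun h => hc (List.mem_cons_of_mem _ h))]
    rw [PySem.Dict.getD_modify, if_neg (fun h => hc (by rw [h]; exact List.mem_cons_self))]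

theorem pv_getD_foldl_modify_of_mem {κ ν : Type} [BEq κ] [LawfulBEq κ] [DecidableEq κ]
    (l : List κ) (d0 : ν) (f : κ → ν → ν) (c : κ) (hnd : l.Nodup) (hc : c ∈ l) :
    ∀ (g : PySem.Dict κ ν),
    (l.foldl (fun g k => g.modify k d0 (f k)) g).getD c d0 = f c (g.getD c d0) := by
  induction l with
  | nil => cases hc
  | cons k t ih =>
    intro g
    simp only [List.foldl_cons]
    rcases List.mem_cons.mp hc with hck | hct
    · subst hck
      rw [pv_getD_foldl_modify_of_not_mem t d0 f c (List.nodup_cons.mp hnd).1]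
      rw [PySem.Dict.getD_modify]; simp
    · rw [ih (List.nodup_cons.mp hnd).2 hct]
      rw [PySem.Dict.getD_modify]
      have hne : c ≠ k := fun h => (List.nodup_cons.mp hnd).1 (h ▸ hct)
      simp [hne]

-- Set.update by elements already present does nothing
theorem pv_set_update_of_subset {α : Type} [BEq α] [LawfulBEq α]
    (l : List α) : ∀ (s : PySem.Set α), (∀ x ∈ l, x ∈ s) → PySem.Set.update s l = s := by
  induction l with
  | nil => intro s _; rfl
  | cons x t ih =>
    intro s hs
    have hx : PySem.Set.add s x = s := by
      simp only [PySem.Set.add]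
      rw [if_pos]
      simpa using hs x (by simp)
    calc PySem.Set.update s (x :: t) = PySem.Set.update (PySem.Set.add s x) t := rfl
      _ = PySem.Set.update s t := by rw [hx]
      _ = s := ih s (fun y hy => hs y (List.mem_cons_of_mem _ hy))

-- keys of B's bucket-creating fold
theorem pv_keys_condInsert {κ : Type} [BEq κ] [LawfulBEq κ] (pk : κ → κ) (l : List κ) :
    ∀ (g : PySem.Dict κ (List κ)),
    (l.foldl (fun g k => if g.contains (pk k) then g else g.insert (pk k) []) g).keys =
      PySem.Set.update g.keys (l.map pk) := by
  induction l with
  | nil => intro g; rfl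
  | cons k t ih =>
    intro g
    simp only [List.foldl_cons, List.map_cons]
    have hstep : (if g.contains (pk k) then g else g.insert (pk k) []).keys = PySem.Set.add g.keys (pk k) := by
      by_cases h : g.contains (pk k) = true
      · rw [if_pos h]
        simp only [PySem.Set.add]
        rw [if_pos]
        simpa using (PySem.Dict.contains_iff_mem_keys g (pk k)).mp h
      · rw [if_neg h, PySem.Dict.keys_insert_of_not_contains _ _ (by simpa using h)]
        simp only [PySem.Set.add]
        rw [if_neg]
        intro hmem
        exact h ((PySem.Dict.contains_iff_mem_keys g (pk k)).mpr (by simpa using hmem))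
    rw [ih, hstep]
    rfl

-- all buckets created by B's first fold are empty
theorem pv_getD_condInsert {κ : Type} [BEq κ] [LawfulBEq κ] [DecidableEq κ] (pk : κ → κ) (l : List κ) :
    ∀ (g : PySem.Dict κ (List κ)), (∀ c, g.getD c [] = []) →
    ∀ c, (l.foldl (fun g k => if g.contains (pk k) then g else g.insert (pk k) []) g).getD c [] = [] := by
  induction l with
  | nil => intro g hg c; exact hg c
  | cons k t ih =>
    intro g hg c
    simp only [List.foldl_cons]
    refine ih _ ?_ c
    intro c'
    by_cases h : g.contains (pk k) = true
    · rw [if_pos h]; exact hg c'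
    · rw [if_neg h, PySem.Dict.getD_insert]
      split <;> [rfl; exact hg c']

-- two dicts with the same nodup key list and the same getD agree on items
theorem pv_items_ext {κ ν : Type} [BEq κ] [LawfulBEq κ] (d d' : PySem.Dict κ ν) (d0 : ν)
    (hk : d.keys = d'.keys) (hnd : d.keys.Nodup)
    (hv : ∀ c ∈ d.keys, d.getD c d0 = d'.getD c d0) : d.items = d'.items := by
  have hlen : d.items.length = d'.items.length := by
    have := congrArg List.length hk
    simpa [PySem.Dict.keys] using this
  apply List.ext_getElem hlen
  intro i h1 h2
  have hk1 : d.items[i].1 = d'.items[i].1 := by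
    simp only [PySem.Dict.keys] at hk
    have h := congrArg (fun l => l[i]?) hk
    simp only [List.getElem?_map, List.getElem?_eq_getElem h1, List.getElem?_eq_getElem h2] at h
    simpa using h
  have hmem1 : d.items[i] ∈ d.items := List.getElem_mem h1
  have hmem2 : d'.items[i] ∈ d'.items := List.getElem_mem h2
  have hg1 : d.getD d.items[i].1 d0 = d.items[i].2 :=
    PySem.Dict.getD_of_mem_items d (by exact hmem1) hnd d0
  have hg2 : d'.getD d'.items[i].1 d0 = d'.items[i].2 :=
    PySem.Dict.getD_of_mem_items d' (by exact hmem2) (hk ▸ hnd) d0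
  have hkeymem : d.items[i].1 ∈ d.keys := by
    simp only [PySem.Dict.keys]
    exact List.mem_map_of_mem hmem1
  have hv' := hv _ hkeymem
  have h2' : d.items[i].2 = d'.items[i].2 := by
    rw [← hg1, hv', hk1, hg2]
  exact Prod.ext hk1 h2'

-- ===== VERDICT (by name: the statement is the Claim_ definition above) =====
-- the heart of the equivalence, stated over the shared dict d
theorem pv_core (d : PySem.Dict String Int) :
    (let ngl := d.keys.foldl (fun g key => g.modify (pvPrefA key) [] (fun v => v ++ [key])) PySem.Dict.empty
     let ngl2 := ngl.keys.foldl (fun g grp => g.modify grp [] (fun v => PySem.List.sorted v (fun n => -(d.getD n 0)) false)) ngl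
     ngl2.items) =
    (let grouped := d.keys.foldl (fun g key => if g.contains (pvPrefA key) then g else g.insert (pvPrefA key) []) PySem.Dict.empty
     let order := PySem.List.sorted d.keys (fun k => -(d.getD k 0)) false
     let grouped2 := order.foldl (fun g key => g.modify (pvPrefA key) [] (fun v => v ++ [key])) grouped
     grouped2.items) := by
  set K : String → Int := fun n => -(d.getD n 0) with hK
  set kd := d.keys with hkd
  set ngl := kd.foldl (fun g key => g.modify (pvPrefA key) [] (fun v => v ++ [key])) PySem.Dict.empty with hngl
  set ngl2 := ngl.keys.foldl (fun g grp => g.modify grp [] (fun v => PySem.List.sorted v K false)) ngl with hngl2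
  set grouped := kd.foldl (fun g key => if g.contains (pvPrefA key) then g else g.insert (pvPrefA key) []) PySem.Dict.empty with hgrouped
  set order := PySem.List.sorted kd K false with horder
  set grouped2 := order.foldl (fun g key => g.modify (pvPrefA key) [] (fun v => v ++ [key])) grouped with hgrouped2
  -- keys of the two result dicts
  have hkeys_ngl : ngl.keys = PySem.Set.update ([] : List String) (kd.map pvPrefA) := by
    rw [hngl, PySem.Dict.keys_foldl_modify_key kd pvPrefA [] (fun _ k => fun v => v ++ [k]) PySem.Dict.empty]
    rw [PySem.Dict.keys_empty]
  have hnodup_ngl : ngl.keys.Nodup := by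
    rw [hngl]
    exact PySem.Dict.nodup_keys_foldl_modify_key kd pvPrefA [] (fun _ k => fun v => v ++ [k]) PySem.Dict.empty (by simp)
  have hkeys_ngl2 : ngl2.keys = ngl.keys := by
    rw [hngl2, PySem.Dict.keys_foldl_modify_key ngl.keys (fun x => x) [] (fun _ _ => fun v => PySem.List.sorted v K false) ngl]
    rw [List.map_id_fun']
    exact pv_set_update_of_subset ngl.keys ngl.keys (fun x hx => hx)
  have hkeys_grouped : grouped.keys = PySem.Set.update ([] : List String) (kd.map pvPrefA) := by
    rw [hgrouped, pv_keys_condInsert pvPrefA kd PySem.Dict.empty, PySem.Dict.keys_empty]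
  have hmem_upd : ∀ x ∈ kd.map pvPrefA, x ∈ PySem.Set.update ([] : List String) (kd.map pvPrefA) := by
    intro x hx
    have : PySem.Set.update ([] : List String) (kd.map pvPrefA) = PySem.Set.ofList (kd.map pvPrefA) := rfl
    rw [this]
    exact (PySem.Set.mem_ofList _ _).mpr hx
  have hkeys_grouped2 : grouped2.keys = grouped.keys := by
    rw [hgrouped2, PySem.Dict.keys_foldl_modify_key order pvPrefA [] (fun _ k => fun v => v ++ [k]) grouped]
    refine pv_set_update_of_subset _ _ ?_
    intro x hx
    rw [hkeys_grouped]
    refine hmem_upd x ?_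
    rcases List.mem_map.mp hx with ⟨k, hk, rfl⟩
    exact List.mem_map_of_mem ((PySem.List.mem_sorted kd K false k).mp hk)
  -- values of A's result
  have hval_ngl : ∀ c, ngl.getD c [] = kd.filter (fun k => pvPrefA k == c) := by
    intro c
    have hfm : ngl = (kd.map (fun k => (pvPrefA k, k))).foldl
        (fun g p => g.modify p.1 [] (fun v => v ++ [p.2])) PySem.Dict.empty := by
      rw [hngl, List.foldl_map]
    rw [hfm, PySem.Dict.getD_foldl_modify_append, PySem.Dict.getD_empty]
    simp [List.filter_map, Function.comp_def]
  have hval_ngl2 : ∀ c ∈ ngl.keys, ngl2.getD c [] = PySem.List.sorted (kd.filter (fun k => pvPrefA k == c)) K false := by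
    intro c hc
    rw [hngl2, pv_getD_foldl_modify_of_mem ngl.keys [] (fun _ v => PySem.List.sorted v K false) c hnodup_ngl hc ngl, hval_ngl c]
  -- values of B's result
  have hval_grouped : ∀ c, grouped.getD c [] = [] := by
    rw [hgrouped]
    exact pv_getD_condInsert pvPrefA kd PySem.Dict.empty (fun c => PySem.Dict.getD_empty c [])
  have hval_grouped2 : ∀ c, grouped2.getD c [] = order.filter (fun k => pvPrefA k == c) := by
    intro c
    have hfm : grouped2 = (order.map (fun k => (pvPrefA k, k))).foldl
        (fun g p => g.modify p.1 [] (fun v => v ++ [p.2])) grouped := by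
      rw [hgrouped2, List.foldl_map]
    rw [hfm, PySem.Dict.getD_foldl_modify_append, hval_grouped c]
    simp [List.filter_map, Function.comp_def]
  -- combine
  apply pv_items_ext ngl2 grouped2 []
  · rw [hkeys_ngl2, hkeys_grouped2, hkeys_ngl, hkeys_grouped]
  · rw [hkeys_ngl2]; exact hnodup_ngl
  · intro c hc
    rw [hkeys_ngl2] at hc
    rw [hval_ngl2 c hc, hval_grouped2 c, horder, pv_filter_sorted]

theorem get_grouped_n_grams_ordered_by_dec_freq_spec : Claim_equal_get_grouped_n_grams_ordered_by_dec_freq := by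
  intro dist _
  unfold Spec_get_grouped_n_grams_ordered_by_dec_freq
  unfold get_grouped_n_grams_ordered_by_dec_freq get_grouped_n_grams_ordered_by_dec_freq_alt
  simp only [pvPrefB_eq_pvPrefA]
  exact pv_core (PySem.Dict.ofList dist)
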